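-- pv_equiv track=rewrite | github.com/YuvalDellus/IntroToCS | learning_to_test/2015_moed_a.py | f
-- ===== SOURCE A (Python) =====
-- def rev(s):
--  return s[ : :-1]
--
-- def f(s):
--     if len(s) < 2:
--         return s
--     else:
--         s2 = s[0:2]
--
--         if s[0] > s[1]:
--             s2 = rev(s2)
--         return s2[0] + f(s2[1]+s[2:])
-- ===== SOURCE B (Python) =====
-- def f(s):
--     # single bubble pass in one linear sweep: carry the running max, emit the smaller char
--     if len(s) < 2:
--         return s
--     out = []
--     carry = s[0]
--     for c in s[1:]:
--         if carry > c:
--             out.append(c)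
--         else:
--             out.append(carry)
--             carry = c
--     out.append(carry)
--     return ''.join(out)
-- ===== Notes on version B (the rewrite author's own statement) =====
-- stated objective: faster
-- what changed: Replaces A's recursion (which rebuilds the remaining string at every step, quadratic) with one linear sweep that carries the running maximum and emits the smaller character, joining the pieces at the end.
import Mathlib
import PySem

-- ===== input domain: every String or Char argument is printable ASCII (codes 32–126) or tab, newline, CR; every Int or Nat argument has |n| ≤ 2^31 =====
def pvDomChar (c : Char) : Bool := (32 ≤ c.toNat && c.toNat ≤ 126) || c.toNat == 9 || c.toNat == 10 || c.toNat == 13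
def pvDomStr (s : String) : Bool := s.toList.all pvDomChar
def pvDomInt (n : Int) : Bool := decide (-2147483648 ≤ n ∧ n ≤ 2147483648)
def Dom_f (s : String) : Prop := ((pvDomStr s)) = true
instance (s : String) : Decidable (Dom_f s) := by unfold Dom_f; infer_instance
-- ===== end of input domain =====

-- B replaces A's string-rebuilding recursion by one linear sweep carrying the running max (objective: faster).

-- ===== PORT A =====
-- A's recursion over the string, step for step: if len < 2 return s; else take the
-- first two chars, swap them if out of order, emit the smaller and recurse on
-- (larger ++ rest).  Done over List Char; f wraps with toList/mk.
def fAux : List Char → List Char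
  | [] => []
  | [c] => [c]
  | a :: b :: rest =>
      if a > b then b :: fAux (a :: rest) else a :: fAux (b :: rest)
termination_by l => l.length
decreasing_by all_goals simp

def f (s : String) : String := String.ofList (fAux s.toList)

-- ===== PORT B =====
-- Source B's loop as a foldl over the tail with state (out, carry).
def fAltStep (st : List Char × Char) (c : Char) : List Char × Char :=
  if st.2 > c then (st.1 ++ [c], st.2) else (st.1 ++ [st.2], c)

def f_alt (s : String) : String :=
  if s.toList.length < 2 then s
  else
    match s.toList with
    | [] => s
    | a :: t =>
        let st := t.foldl fAltStep ([], a)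
        String.ofList (st.1 ++ [st.2])

-- ===== PRECONDITION & SPEC =====
def Spec_f (s : String) (out : String) : Prop := out = f_alt s
instance (s : String) (out : String) : Decidable (Spec_f s out) := by unfold Spec_f; infer_instance

-- ===== CLAIM (what is proved, stated in full; the proofs are below) =====
def Claim_equal_f : Prop := ∀ (s : String), Dom_f s → Spec_f s (f s)

-- ===== LEMMAS AND PROOFS =====
lemma loop_spec (l : List Char) : ∀ (out : List Char) (carry : Char),
    (l.foldl fAltStep (out, carry)).1 ++ [(l.foldl fAltStep (out, carry)).2]
      = out ++ fAux (carry :: l) := by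
  induction l with
  | nil => intro out carry; simp [fAux]
  | cons c rest ih =>
      intro out carry
      by_cases h : carry > c
      · simp [List.foldl, fAltStep, h, fAux, ih]
      · simp [List.foldl, fAltStep, h, fAux, ih]

-- ===== VERDICT (by name: the statement is the Claim_ definition above) =====
theorem f_spec : Claim_equal_f := by
  intro s _
  unfold Spec_f f f_alt
  by_cases h : s.toList.length < 2
  · simp only [h, if_true]
    match hs : s.toList with
    | [] => simp only [fAux]; rw [← hs]; exact String.ofList_toList
    | [c] => simp only [fAux]; rw [← hs]; exact String.ofList_toList
    | a :: b :: t => rw [hs] at h; simp at h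
  · simp only [h, if_false]
    match hs : s.toList with
    | [] => rw [hs] at h; simp at h
    | a :: t =>
        simp only []
        rw [show (t.foldl fAltStep ([], a)).1 ++ [(t.foldl fAltStep ([], a)).2]
              = [] ++ fAux (a :: t) from loop_spec t [] a]
        simp
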